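-- pv_equiv track=rewrite | github.com/microncomputer/codingthematrix | 03_TheVectorSpace/lightsout_continued.py | vector_sum_subset
-- ===== SOURCE A (Python) =====
-- def vector_sum_subset(s, L):
--     # NOTE: THIS DOES NOT WORK FOR VEC'S YET. IT WAS WRITTEN FOR LIST VECTORS IN PREVIOUS SECTION
--     # the brute force solution is to try all subsets of L, which in this case is 25 different button push vectors
--     # that would be 2^|L| computations, 2^25 = 33554432
--
--     # a function used within this function:
--     # sum GF2 vector lists and return true if they equal another vector sumVec
--     def sumvec(sumVec, vectorlist):
--         s = [sum(vectorlist[i][j] for i in range(len(vectorlist))) for j in range(len(vectorlist[0]))]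
--         if s == sumVec:
--             return True
--         else:
--             return False
--
--     """
--     i&1<<k will be true if there's a 1 in the k place in the binary representation of i
--     since k will cover each bit in the length of binary needed for all i's EVERy time
--     there has to be at least one true i&1<<k for each i > 0
--
--     ok, so i will go from 0 through 2^(len(vectorset))-1
--     and at each i, k will go from 0 through len(vectorset)-1
--     so 2^len * len operations
--     """
--     powerset = [[L[k] for k in range(len(L)) if i & 1 << k] for i in range(2 ** (len(L)))]
--     powerset.remove([])
--     # return powerset
--     return [powerset[i] for i in range(len(powerset)) if sumvec(s, powerset[i])]
-- ===== SOURCE B (Python) =====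
-- def vector_sum_subset(s, L):
--     # One pass of "subset doubling": enumerate subsets in the same order as
--     # ascending bit-masks, carrying each subset's componentwise sum, so every
--     # subset's sum costs one vector addition instead of a full re-summation.
--     pairs = [([], None)]  # (subset, componentwise sum; None marks the empty subset)
--     for v in reversed(L):
--         nxt = []
--         for sub, t in pairs:
--             nxt.append((sub, t))
--             nxt.append(([v] + sub, v if t is None else [a + b for a, b in zip(v, t)]))
--         pairs = nxt
--     return [sub for sub, t in pairs if t == s]
-- ===== Notes on version B (the rewrite author's own statement) =====
-- stated objective: faster
-- what changed: Instead of materialising the whole powerset and re-summing every subset from scratch (and then filtering by index), B enumerates subsets by doubling a list of (subset, running-sum) pairs, so each subset's componentwise sum costs a single vector addition.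
import Mathlib
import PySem

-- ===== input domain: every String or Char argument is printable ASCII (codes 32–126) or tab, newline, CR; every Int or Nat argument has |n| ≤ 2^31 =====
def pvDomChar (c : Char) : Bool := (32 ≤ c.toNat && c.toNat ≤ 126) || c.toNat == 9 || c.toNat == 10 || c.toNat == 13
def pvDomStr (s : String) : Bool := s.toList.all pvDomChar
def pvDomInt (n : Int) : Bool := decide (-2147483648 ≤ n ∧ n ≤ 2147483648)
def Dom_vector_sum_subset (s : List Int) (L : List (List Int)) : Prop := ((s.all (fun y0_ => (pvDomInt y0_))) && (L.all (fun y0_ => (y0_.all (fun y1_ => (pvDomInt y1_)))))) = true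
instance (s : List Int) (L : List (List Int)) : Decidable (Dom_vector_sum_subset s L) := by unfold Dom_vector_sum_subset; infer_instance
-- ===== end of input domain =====

-- B replaces A's per-subset re-summation by one "subset doubling" pass that carries
-- each subset's componentwise sum (objective: faster).

-- ===== PORT A =====
-- Indexing is ported with pyGetD; under Pre_ (non-decreasing vector lengths) every
-- index Python touches is in range, so the default is never the result there (exact on Pre_).
def vector_sum_subset (s : List Int) (L : List (List Int)) : List (List (List Int)) :=
  let sumvec : List Int → List (List Int) → Bool := fun sumVec vectorlist =>
    let t := (PySem.List.pyRange 0 ((PySem.List.pyGetD vectorlist 0 []).length : Int) 1).map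
      (fun j => ((PySem.List.pyRange 0 (vectorlist.length : Int) 1).map
        (fun i => PySem.List.pyGetD (PySem.List.pyGetD vectorlist i []) j 0)).sum)
    if t = sumVec then true else false
  let powerset := (PySem.List.pyRange 0 ((2:Int) ^ L.length) 1).map
    (fun i => ((PySem.List.pyRange 0 (L.length : Int) 1).filter
        (fun k => PySem.Int.band i ((1:Int) <<< k.toNat) != 0)).map
      (fun k => PySem.List.pyGetD L k []))
  let powerset' := match PySem.List.remove? powerset [] with
    | some ps => ps
    | none => []   -- unreachable: powerset always contains [] (at i = 0)
  ((PySem.List.pyRange 0 (powerset'.length : Int) 1).filter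
      (fun i => sumvec s (PySem.List.pyGetD powerset' i []))).map
    (fun i => PySem.List.pyGetD powerset' i [])

-- ===== PORT B =====
-- componentwise sum of two vectors, truncating like Python's zip
def vsAdd (v t : List Int) : List Int := (v.zip t).map (fun q => q.1 + q.2)

def vector_sum_subset_alt (s : List Int) (L : List (List Int)) : List (List (List Int)) :=
  let pairs := L.reverse.foldl
    (fun pairs v => pairs.foldl
      (fun nxt p => nxt ++ [p, (v :: p.1,
        some (match p.2 with | none => v | some t => vsAdd v t))]) [])
    [(([] : List (List Int)), (none : Option (List Int)))]
  (pairs.filter (fun p => p.2 == some s)).map (fun p => p.1)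

-- ===== PRECONDITION & SPEC =====
-- Pre_ excludes exactly the inputs where A raises IndexError: whenever some vector of L
-- is longer than a later one, the 2-element subset of those two makes A's sumvec index
-- past the shorter vector's end.
def Pre_vector_sum_subset (s : List Int) (L : List (List Int)) : Prop :=
  L.Pairwise (fun u v => u.length ≤ v.length)
instance (s : List Int) (L : List (List Int)) : Decidable (Pre_vector_sum_subset s L) := by
  unfold Pre_vector_sum_subset; infer_instance

def pvWitness_vector_sum_subset : List Int × List (List Int) := ([2], [[1], [1], [2]])

def Spec_vector_sum_subset (s : List Int) (L : List (List Int)) (out : List (List (List Int))) : Prop := out = vector_sum_subset_alt s L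
instance (s : List Int) (L : List (List Int)) (out : List (List (List Int))) : Decidable (Spec_vector_sum_subset s L out) := by unfold Spec_vector_sum_subset; infer_instance

-- ===== CLAIM (what is proved, stated in full; the proofs are below) =====
def Claim_equal_vector_sum_subset : Prop := ∀ (s : List Int) (L : List (List Int)), Dom_vector_sum_subset s L → Pre_vector_sum_subset s L → Spec_vector_sum_subset s L (vector_sum_subset s L)

-- ===== LEMMAS AND PROOFS =====

-- the subset of L selected by the bits of i (A's comprehension, on the Nat side)
def subsetOf (L : List (List Int)) (i : Nat) : List (List Int) :=
  ((List.range L.length).filter (fun k => i &&& (1 <<< k) != 0)).map (fun k => L.getD k [])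

-- all subsets of L, in ascending-bit-mask order (B's doubling order)
def enumSub : List (List Int) → List (List (List Int))
  | [] => [[]]
  | v :: rest => (enumSub rest).flatMap (fun t => [t, v :: t])

-- B's incrementally carried sum of a subset
def gsum : List (List Int) → Option (List Int)
  | [] => none
  | v :: rest => some (match gsum rest with | none => v | some t => vsAdd v t)

-- A's column-sum list of a subset
def colList (sub : List (List Int)) : List Int :=
  (List.range (sub.headD []).length).map (fun j => (sub.map (fun w => w.getD j 0)).sum)

lemma range_two_mul_map {α : Type} (m : Nat) (f : Nat → α) :
    (List.range (2*m)).map f = (List.range m).flatMap (fun j => [f (2*j), f (2*j+1)]) := by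
  induction m with
  | zero => simp
  | succ m ih =>
    have h : 2*(m+1) = 2*m + 1 + 1 := by omega
    rw [h, List.range_succ, List.range_succ, List.range_succ]
    simp [ih]

lemma subsetOf_zero (L : List (List Int)) : subsetOf L 0 = [] := by
  simp [subsetOf]

lemma subsetOf_cons (v : List Int) (L : List (List Int)) (i : Nat) :
    subsetOf (v::L) i = (if i % 2 = 1 then [v] else []) ++ subsetOf L (i/2) := by
  unfold subsetOf
  rw [List.length_cons, List.range_succ_eq_map, List.filter_cons]
  have hbit : ∀ k : Nat, ((fun k => i &&& 1 <<< k != 0) ∘ Nat.succ) k = (i/2 &&& 1 <<< k != 0) := by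
    intro k
    simp only [Function.comp, Nat.one_shiftLeft, Nat.and_two_pow]
    rw [← Nat.testBit_succ]
    simp [bne]
  have h0 : (i &&& 1 <<< 0 != 0) = decide (i % 2 = 1) := by
    rcases Nat.mod_two_eq_zero_or_one i with h | h <;> simp [Nat.and_one_is_mod, h]
  simp only [List.filter_map]
  rw [h0, List.filter_congr (fun k _ => hbit k)]
  by_cases hi : i % 2 = 1 <;>
    simp [hi, List.map_map, Function.comp_def]

lemma powN_eq_enumSub (L : List (List Int)) :
    (List.range (2^L.length)).map (subsetOf L) = enumSub L := by
  induction L with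
  | nil => simp [enumSub, subsetOf_zero]
  | cons v rest ih =>
    rw [List.length_cons, pow_succ, mul_comm, range_two_mul_map]
    rw [enumSub, ← ih, List.flatMap_map]
    congr 1
    funext j
    have h1 : (2*j) % 2 = 0 := by omega
    have h2 : (2*j) / 2 = j := by omega
    have h3 : (2*j+1) % 2 = 1 := by omega
    have h4 : (2*j+1) / 2 = j := by omega
    simp [subsetOf_cons, h1, h2, h3, h4]

lemma enumSub_shape (L : List (List Int)) :
    ∃ tl, enumSub L = [] :: tl ∧ [] ∉ tl := by
  induction L with
  | nil => exact ⟨[], rfl, by simp⟩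
  | cons v rest ih =>
    obtain ⟨tl, heq, hmem⟩ := ih
    refine ⟨[v] :: tl.flatMap (fun t => [t, v :: t]), by rw [enumSub, heq]; rfl, ?_⟩
    intro hc
    rcases List.mem_cons.mp hc with h | h
    · simp at h
    · obtain ⟨t, ht, hmem2⟩ := List.mem_flatMap.mp h
      simp only [List.mem_cons] at hmem2
      rcases hmem2 with h2 | h2 | h2
      · exact hmem (h2 ▸ ht)
      · simp at h2
      · simp at h2

lemma sublist_of_mem_enumSub {t : List (List Int)} {L : List (List Int)}
    (h : t ∈ enumSub L) : t.Sublist L := by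
  induction L generalizing t with
  | nil => simp [enumSub] at h; simp [h]
  | cons v rest ih =>
    rw [enumSub] at h
    obtain ⟨u, hu, hmem⟩ := List.mem_flatMap.mp h
    simp only [List.mem_cons, List.not_mem_nil, or_false] at hmem
    rcases hmem with h2 | h2
    · exact (h2 ▸ (ih hu)).cons _
    · exact h2 ▸ ((ih hu).cons₂ _)

lemma list_eq_map_range {α : Type} (xs : List α) (d : α) :
    xs = (List.range xs.length).map (fun j => xs.getD j d) := by
  apply List.ext_getElem
  · simp
  · intro i h1 h2
    simp [List.getD_eq_getElem?_getD, List.getElem?_eq_getElem (by simpa using h2)]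

lemma zip_map_range {α β : Type} (f : Nat → α) (g : Nat → β) {d0 d1 : Nat} (h : d0 ≤ d1) :
    ((List.range d0).map f).zip ((List.range d1).map g)
      = (List.range d0).map (fun j => (f j, g j)) := by
  apply List.ext_getElem
  · simp; omega
  · intro i h1 h2
    simp [List.getElem_zip]

lemma vsAdd_eq (v u : List Int) (ct : Nat → Int) {d1 : Nat}
    (hu : u = (List.range d1).map ct) (hle : v.length ≤ d1) :
    vsAdd v u = (List.range v.length).map (fun j => v.getD j 0 + ct j) := by
  subst hu
  conv_lhs => rw [vsAdd, list_eq_map_range v 0]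
  rw [zip_map_range _ _ hle]
  simp [List.map_map, Function.comp_def]

lemma gsum_eq_colList (t : List (List Int)) (hne : t ≠ [])
    (hp : t.Pairwise (fun u v => u.length ≤ v.length)) :
    gsum t = some (colList t) := by
  induction t with
  | nil => exact absurd rfl hne
  | cons v rest ih =>
    cases rest with
    | nil =>
      show gsum [v] = some (colList [v])
      simp only [gsum, colList, List.headD_cons, List.map_cons, List.map_nil,
        List.sum_cons, List.sum_nil, add_zero]
      exact congrArg some (list_eq_map_range v 0)
    | cons w rest2 =>
      have hp' := hp.of_cons
      have hih := ih (by simp) hp'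
      have hle : v.length ≤ w.length := (List.pairwise_cons.mp hp).1 w (by simp)
      rw [gsum, hih]
      refine congrArg some ?_
      show vsAdd v (colList (w :: rest2)) = colList (v :: w :: rest2)
      rw [vsAdd_eq v (colList (w::rest2)) (fun j => ((w::rest2).map (fun ww => ww.getD j 0)).sum)
            (by simp [colList]) hle]
      simp [colList]

-- A unfolded to its Nat-side normal form
lemma pow_cast (L : List (List Int)) :
    (PySem.List.pyRange 0 ((2:Int) ^ L.length) 1).map
      (fun i => ((PySem.List.pyRange 0 (L.length : Int) 1).filter
          (fun k => PySem.Int.band i ((1:Int) <<< k.toNat) != 0)).map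
        (fun k => PySem.List.pyGetD L k []))
    = (List.range (2^L.length)).map (subsetOf L) := by
  have h2 : ((2:Int) ^ L.length) = ((2^L.length : Nat) : Int) := by push_cast; ring
  rw [h2, PySem.List.pyRange_zero_nat (2^L.length), List.map_map]
  apply List.map_congr_left
  intro i _
  simp only [Function.comp_def]
  rw [PySem.List.pyRange_zero_nat L.length, List.filter_map, List.map_map]
  unfold subsetOf
  congr 1
  · funext k
    simp [Function.comp, PySem.List.pyGetD_natCast]
  congr 1
  funext k
  simp only [Function.comp, Int.toNat_natCast, Int.one_shiftLeft,
    PySem.Int.band_natCast, Nat.one_shiftLeft]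
  simp [bne]

lemma final_stage (f : List (List Int) → Bool) (ps : List (List (List Int))) :
    ((PySem.List.pyRange 0 (ps.length : Int) 1).filter
        (fun i => f (PySem.List.pyGetD ps i []))).map
      (fun i => PySem.List.pyGetD ps i [])
    = ps.filter f := by
  rw [PySem.List.pyRange_zero_nat ps.length, List.filter_map, List.map_map]
  have hfun : ((fun i : Int => PySem.List.pyGetD ps i []) ∘ (fun k : Nat => (k:Int)))
      = fun k : Nat => ps.getD k [] := by
    funext k; simp [Function.comp, PySem.List.pyGetD_natCast]
  have hpred : ((fun i : Int => f (PySem.List.pyGetD ps i [])) ∘ (fun k : Nat => (k:Int)))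
      = fun k : Nat => f (ps.getD k []) := by
    funext k; simp [Function.comp, PySem.List.pyGetD_natCast]
  rw [hfun, hpred]
  conv_rhs => rw [list_eq_map_range ps ([] : List (List Int)), List.filter_map]
  simp [Function.comp_def]

lemma sumvec_eq (s : List Int) (t : List (List Int)) :
    (if (PySem.List.pyRange 0 ((PySem.List.pyGetD t 0 []).length : Int) 1).map
        (fun j => ((PySem.List.pyRange 0 (t.length : Int) 1).map
          (fun i => PySem.List.pyGetD (PySem.List.pyGetD t i []) j 0)).sum) = s
     then true else false) = decide (colList t = s) := by
  have hhead : PySem.List.pyGetD t 0 [] = t.headD [] := by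
    cases t <;> simp [PySem.List.pyGetD, PySem.List.pyIdx?, PySem.List.pyGet?]
  have hX : (PySem.List.pyRange 0 ((PySem.List.pyGetD t 0 []).length : Int) 1).map
        (fun j => ((PySem.List.pyRange 0 (t.length : Int) 1).map
          (fun i => PySem.List.pyGetD (PySem.List.pyGetD t i []) j 0)).sum) = colList t := by
    rw [hhead, PySem.List.pyRange_zero_nat (t.headD []).length, List.map_map]
    unfold colList
    apply List.map_congr_left
    intro j _
    simp only [Function.comp_def]
    rw [show (fun i : Int => PySem.List.pyGetD (PySem.List.pyGetD t i []) ((j:Nat):Int) 0)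
          = (fun w => PySem.List.pyGetD w ((j:Nat):Int) 0) ∘ (fun i : Int => PySem.List.pyGetD t i []) from rfl,
        ← List.map_map, PySem.List.map_pyGetD_pyRange_zero']
    refine congrArg List.sum (List.map_congr_left ?_)
    intro w _
    simp [PySem.List.pyGetD_natCast]
  rw [hX]
  by_cases h : colList t = s <;> simp [h]

lemma A_norm (s : List Int) (L : List (List Int)) :
    vector_sum_subset s L
      = ((List.range (2^L.length)).map (subsetOf L)).tail.filter
          (fun t => decide (colList t = s)) := by
  rw [vector_sum_subset]
  simp only [pow_cast]
  have hsplit : (List.range (2^L.length)).map (subsetOf L)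
      = [] :: ((List.range (2^L.length)).map (subsetOf L)).tail := by
    have h1 : 2^L.length = (2^L.length - 1) + 1 := by
      have := Nat.one_le_two_pow (n := L.length); omega
    rw [h1, List.range_succ_eq_map]
    simp [subsetOf_zero]
  rw [hsplit, PySem.List.remove?_cons_self]
  simp only
  rw [final_stage (fun vectorlist =>
    (if (PySem.List.pyRange 0 ((PySem.List.pyGetD vectorlist 0 []).length : Int) 1).map
        (fun j => ((PySem.List.pyRange 0 (vectorlist.length : Int) 1).map
          (fun i => PySem.List.pyGetD (PySem.List.pyGetD vectorlist i []) j 0)).sum) = s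
     then true else false))]
  exact List.filter_congr (fun t _ => sumvec_eq s t)

-- B unfolded to its normal form
lemma B_pairs (L : List (List Int)) :
    L.reverse.foldl
      (fun pairs v => pairs.foldl
        (fun nxt p => nxt ++ [p, (v :: p.1,
          some (match p.2 with | none => v | some t => vsAdd v t))]) [])
      [(([] : List (List Int)), (none : Option (List Int)))]
    = (enumSub L).map (fun t => (t, gsum t)) := by
  rw [List.foldl_reverse]
  induction L with
  | nil => simp [enumSub, gsum]
  | cons v rest ih =>
    rw [List.foldr_cons, ih, enumSub]
    have hfold : ∀ (l : List (List (List Int) × Option (List Int))),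
        List.foldl (fun nxt p => nxt ++ [p, (v :: p.1,
          some (match p.2 with | none => v | some t => vsAdd v t))]) [] l
        = l.flatMap (fun p => [p, (v :: p.1,
            some (match p.2 with | none => v | some t => vsAdd v t))]) := by
      intro l
      simpa using PySem.List.foldl_append_eq_flatMap
        (fun p => [p, (v :: p.1,
          some (match p.2 with | none => v | some t => vsAdd v t))]) l []
    rw [hfold, List.flatMap_map, List.map_flatMap]
    rfl

lemma B_norm (s : List Int) (L : List (List Int)) :
    vector_sum_subset_alt s L
      = (enumSub L).filter (fun t => gsum t == some s) := by
  unfold vector_sum_subset_alt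
  rw [B_pairs]
  simp only [List.filter_map, List.map_map]
  simp [Function.comp_def]

-- ===== VERDICT (by name: the statement is the Claim_ definition above) =====
theorem vector_sum_subset_spec : Claim_equal_vector_sum_subset := by
  intro s L _hD hP
  unfold Spec_vector_sum_subset
  rw [A_norm, B_norm, powN_eq_enumSub]
  obtain ⟨tl, hshape, hnotin⟩ := enumSub_shape L
  rw [hshape]
  simp only [List.tail_cons, List.filter_cons]
  have hg0 : (gsum [] == some s) = false := by simp [gsum]
  rw [hg0]
  apply List.filter_congr
  intro t ht
  have htne : t ≠ [] := fun h => hnotin (h ▸ ht)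
  have hsub : t.Sublist L := sublist_of_mem_enumSub (by rw [hshape]; exact List.mem_cons_of_mem _ ht)
  have hpt := hP.sublist hsub
  rw [gsum_eq_colList t htne hpt]
  rcases eq_or_ne (colList t) s with h | h
  · simp [h]
  · simp [h]
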